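-- pv_equiv track=rewrite | github.com/radixark/miles | miles/utils/vision_dp.py | assign_images_to_dp_ranks
-- ===== SOURCE A (Python) =====
-- def assign_images_to_dp_ranks(
--     patch_counts: list[int],
--     dp_size: int,
-- ) -> tuple[list[list[int]], list[int]]:
--     """
--     Assign whole images to DP ranks using contiguous distribution.
--
--     The algorithm:
--     - Divide images into dp_size contiguous chunks
--     - rank 0 gets images [0, 1, ...], rank 1 gets next chunk, etc.
--     - This allows simple concat after gather (no reordering needed)
--
--     Args:
--         patch_counts: Number of patches per image (used only for rank_patch_counts)
--         dp_size: Number of DP ranks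
--
--     Returns:
--         image_assignments: List of image indices per rank
--         rank_patch_counts: Total patches per rank
--     """
--     num_images = len(patch_counts)
--     if num_images == 0:
--         return [[] for _ in range(dp_size)], [0] * dp_size
--
--     image_assignments = [[] for _ in range(dp_size)]
--     rank_loads = [0] * dp_size
--
--     base_size = num_images // dp_size
--     remainder = num_images % dp_size
--
--     start = 0
--     for rank in range(dp_size):
--         chunk_size = base_size + (1 if rank < remainder else 0)
--         end = start + chunk_size
--
--         for img_idx in range(start, end):
--             image_assignments[rank].append(img_idx)
--             rank_loads[rank] += patch_counts[img_idx]
--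
--         start = end
--
--     return image_assignments, rank_loads
-- ===== SOURCE B (Python) =====
-- def assign_images_to_dp_ranks(
--     patch_counts: list[int],
--     dp_size: int,
-- ) -> tuple[list[list[int]], list[int]]:
--     """Single pass over images: each image's rank is computed by a closed-form
--     boundary formula (extras-first contiguous chunking), no per-rank inner loop."""
--     num_images = len(patch_counts)
--     image_assignments = [[] for _ in range(dp_size)]
--     rank_loads = [0] * dp_size
--     if num_images == 0:
--         return image_assignments, rank_loads
--
--     base, rem = divmod(num_images, dp_size)
--     cut = rem * (base + 1)  # first `rem` ranks hold base+1 images each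
--     for i, pc in enumerate(patch_counts):
--         rank = i // (base + 1) if i < cut else rem + (i - cut) // base
--         image_assignments[rank].append(i)
--         rank_loads[rank] += pc
--     return image_assignments, rank_loads
-- ===== Notes on version B (the rewrite author's own statement) =====
-- stated objective: alternative
-- what changed: Instead of A's per-rank outer loop with an inner loop over each contiguous chunk, B makes a single pass over the images and computes each image's rank directly with a closed-form boundary formula (first rem ranks get base+1 images, the rest base).
-- outside the precondition, e.g. on assign_images_to_dp_ranks([5], 0): A raises ZeroDivisionError, B raises ZeroDivisionError; on assign_images_to_dp_ranks([5], -1): A returns ([], []), B raises IndexError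
import Mathlib
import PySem

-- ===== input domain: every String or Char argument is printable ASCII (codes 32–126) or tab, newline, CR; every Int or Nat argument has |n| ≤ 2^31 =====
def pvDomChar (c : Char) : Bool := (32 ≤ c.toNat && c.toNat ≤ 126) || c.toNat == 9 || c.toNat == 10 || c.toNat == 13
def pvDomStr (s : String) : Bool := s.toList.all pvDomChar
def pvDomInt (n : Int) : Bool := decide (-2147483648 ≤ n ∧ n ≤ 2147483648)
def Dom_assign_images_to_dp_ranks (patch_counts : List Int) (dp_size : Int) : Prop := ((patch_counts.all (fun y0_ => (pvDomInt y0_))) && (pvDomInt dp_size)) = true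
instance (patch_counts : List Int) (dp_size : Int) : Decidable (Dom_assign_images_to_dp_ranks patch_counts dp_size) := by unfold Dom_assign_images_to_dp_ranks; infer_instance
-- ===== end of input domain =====

-- B replaces A's per-rank outer loop (with an inner loop per contiguous chunk) by a single pass over
-- the images, computing each image's rank with a closed-form boundary formula; alternative decomposition, same cost.

-- ===== PORT A =====
-- inner loop body: image_assignments[rank].append(img_idx); rank_loads[rank] += patch_counts[img_idx]
-- (rank and img_idx are always in range here under Pre_, so pyGetD/pySetD are exact)
def pvInnerA (pcs : List Int) (rank : Int) (st2 : List (List Int) × List Int) (img_idx : Int) : List (List Int) × List Int :=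
  (PySem.List.pySetD st2.1 rank (PySem.List.pyGetD st2.1 rank [] ++ [img_idx]),
   PySem.List.pySetD st2.2 rank (PySem.List.pyGetD st2.2 rank 0 + PySem.List.pyGetD pcs img_idx 0))

-- outer loop body: chunk_size, end, the inner for-loop, start = end  (state = (image_assignments, rank_loads, start))
def pvBodyA (pcs : List Int) (base rem : Int) (st : List (List Int) × List Int × Int) (rank : Int) : List (List Int) × List Int × Int :=
  let e := st.2.2 + (base + (if rank < rem then (1 : Int) else 0))
  let inner := (PySem.List.pyRange st.2.2 e 1).foldl (pvInnerA pcs rank) (st.1, st.2.1)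
  (inner.1, inner.2, e)

def assign_images_to_dp_ranks (patch_counts : List Int) (dp_size : Int) : List (List Int) × List Int :=
  let num_images : Int := PySem.List.len patch_counts
  if num_images = 0 then
    ((PySem.List.pyRange 0 dp_size 1).map (fun _ => ([] : List Int)),
     (PySem.List.pyRange 0 dp_size 1).map (fun _ => (0 : Int)))
  else
    let image_assignments : List (List Int) := (PySem.List.pyRange 0 dp_size 1).map (fun _ => ([] : List Int))
    let rank_loads : List Int := (PySem.List.pyRange 0 dp_size 1).map (fun _ => (0 : Int))
    let base_size := PySem.Int.floordiv num_images dp_size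
    let remainder := PySem.Int.mod num_images dp_size
    let res := (PySem.List.pyRange 0 dp_size 1).foldl (pvBodyA patch_counts base_size remainder)
      (image_assignments, rank_loads, 0)
    (res.1, res.2.1)

-- ===== PORT B =====
-- loop body of B's single pass: rank from the closed-form formula, then the two updates
def pvBodyB (base rem cut : Int) (st : List (List Int) × List Int) (p : Int × Int) : List (List Int) × List Int :=
  let rank := if p.1 < cut then PySem.Int.floordiv p.1 (base + 1)
              else rem + PySem.Int.floordiv (p.1 - cut) base
  (PySem.List.pySetD st.1 rank (PySem.List.pyGetD st.1 rank [] ++ [p.1]),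
   PySem.List.pySetD st.2 rank (PySem.List.pyGetD st.2 rank 0 + p.2))

def assign_images_to_dp_ranks_alt (patch_counts : List Int) (dp_size : Int) : List (List Int) × List Int :=
  let num_images : Int := PySem.List.len patch_counts
  let image_assignments : List (List Int) := (PySem.List.pyRange 0 dp_size 1).map (fun _ => ([] : List Int))
  let rank_loads : List Int := (PySem.List.pyRange 0 dp_size 1).map (fun _ => (0 : Int))
  if num_images = 0 then (image_assignments, rank_loads)
  else
    let base := PySem.Int.floordiv num_images dp_size
    let rem := PySem.Int.mod num_images dp_size
    let cut := rem * (base + 1)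
    (PySem.List.enumerate patch_counts 0).foldl (pvBodyB base rem cut) (image_assignments, rank_loads)

-- ===== PRECONDITION & SPEC =====
-- Pre_ excludes dp_size ≤ 0 with a nonempty list: dp_size = 0 makes A raise ZeroDivisionError, and a
-- negative dp_size is outside the natural domain (a count of ranks); there A accidentally returns ([], [])
-- from its empty range loops while B raises.
def Pre_assign_images_to_dp_ranks (patch_counts : List Int) (dp_size : Int) : Prop :=
  1 ≤ dp_size ∨ patch_counts = []
instance (patch_counts : List Int) (dp_size : Int) : Decidable (Pre_assign_images_to_dp_ranks patch_counts dp_size) := by unfold Pre_assign_images_to_dp_ranks; infer_instance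

def pvWitness_assign_images_to_dp_ranks : List Int × Int := ([3, 1, 2, 7, 5], 3)

def Spec_assign_images_to_dp_ranks (patch_counts : List Int) (dp_size : Int) (out : List (List Int) × List Int) : Prop := out = assign_images_to_dp_ranks_alt patch_counts dp_size
instance (patch_counts : List Int) (dp_size : Int) (out : List (List Int) × List Int) : Decidable (Spec_assign_images_to_dp_ranks patch_counts dp_size out) := by unfold Spec_assign_images_to_dp_ranks; infer_instance

-- ===== CLAIM (what is proved, stated in full; the proofs are below) =====
def Claim_equal_assign_images_to_dp_ranks : Prop := ∀ (patch_counts : List Int) (dp_size : Int), Dom_assign_images_to_dp_ranks patch_counts dp_size → Pre_assign_images_to_dp_ranks patch_counts dp_size → Spec_assign_images_to_dp_ranks patch_counts dp_size (assign_images_to_dp_ranks patch_counts dp_size)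

-- ===== LEMMAS AND PROOFS =====

-- common per-image step, taking the (rank, image-index) pair precomputed
def pvStep (pcs : List Int) (st : List (List Int) × List Int) (p : Int × Int) : List (List Int) × List Int :=
  (PySem.List.pySetD st.1 p.1 (PySem.List.pyGetD st.1 p.1 [] ++ [p.2]),
   PySem.List.pySetD st.2 p.1 (PySem.List.pyGetD st.2 p.1 0 + PySem.List.pyGetD pcs p.2 0))

-- first image index of rank r (extras-first contiguous chunking)
def pvStart (base rem r : Int) : Int := r * base + min r rem

-- B's closed-form rank of image i
def pvRank (base rem cut i : Int) : Int :=
  if i < cut then PySem.Int.floordiv i (base + 1) else rem + PySem.Int.floordiv (i - cut) base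

lemma pvStart_succ (base rem r : Int) (_hr : 0 ≤ r) (_hrem : 0 ≤ rem) :
    pvStart base rem (r + 1) = pvStart base rem r + (base + (if r < rem then (1 : Int) else 0)) := by
  unfold pvStart
  split_ifs with h
  · have h1 : min r rem = r := by omega
    have h2 : min (r + 1) rem = r + 1 := by omega
    rw [h1, h2]; ring
  · have h1 : min r rem = rem := by omega
    have h2 : min (r + 1) rem = rem := by omega
    rw [h1, h2]; ring

lemma pvStart_mono (base rem r s : Int) (hbase : 0 ≤ base) (h : r ≤ s) :
    pvStart base rem r ≤ pvStart base rem s := by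
  have hm : min r rem ≤ min s rem := by omega
  have hp : r * base ≤ s * base := mul_le_mul_of_nonneg_right h hbase
  unfold pvStart; linarith

lemma pvRank_eq (base rem r i : Int) (hbase : 0 ≤ base) (_hrem : 0 ≤ rem) (_hr : 0 ≤ r)
    (hi1 : pvStart base rem r ≤ i) (hi2 : i < pvStart base rem (r + 1)) :
    pvRank base rem (rem * (base + 1)) i = r := by
  unfold pvStart at hi1 hi2
  unfold pvRank
  by_cases h : r < rem
  · have h1 : min r rem = r := by omega
    have h2 : min (r + 1) rem = r + 1 := by omega
    rw [h1] at hi1; rw [h2] at hi2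
    have hlo : r * (base + 1) ≤ i := by linarith [hi1]  -- r*base + r
    have hhi : i < (r + 1) * (base + 1) := by nlinarith
    have hcut : (r + 1) * (base + 1) ≤ rem * (base + 1) :=
      mul_le_mul_of_nonneg_right (by omega) (by omega)
    rw [if_pos (by linarith)]
    rw [(PySem.Int.floordiv_eq_iff_of_pos (by omega)).2 ⟨hlo, hhi⟩]
  · have h1 : min r rem = rem := by omega
    have h2 : min (r + 1) rem = rem := by omega
    rw [h1] at hi1; rw [h2] at hi2
    have hbase1 : 1 ≤ base := by nlinarith
    have hrb : rem * base ≤ r * base := mul_le_mul_of_nonneg_right (by omega) hbase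
    have hnotcut : ¬ i < rem * (base + 1) := by nlinarith
    rw [if_neg hnotcut]
    have hlo : (r - rem) * base ≤ i - rem * (base + 1) := by nlinarith
    have hhi : i - rem * (base + 1) < (r - rem + 1) * base := by nlinarith
    rw [(PySem.Int.floordiv_eq_iff_of_pos (by omega)).2 ⟨hlo, hhi⟩]
    ring

-- the flattened (rank, image) pair list of A equals B's image-major pair list
lemma pvFlat (base rem : Int) (hbase : 0 ≤ base) (hrem : 0 ≤ rem) :
    ∀ (k : Nat) (r : Int), 0 ≤ r →
    (PySem.List.pyRange r (r + k) 1).flatMap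
        (fun q => (PySem.List.pyRange (pvStart base rem q) (pvStart base rem (q + 1)) 1).map (fun i => (q, i)))
      = (PySem.List.pyRange (pvStart base rem r) (pvStart base rem (r + k)) 1).map
          (fun i => (pvRank base rem (rem * (base + 1)) i, i)) := by
  intro k
  induction k with
  | zero =>
    intro r hr
    simp [PySem.List.pyRange_one_eq_nil]
  | succ k ih =>
    intro r hr
    have hcons : PySem.List.pyRange r (r + (k + 1 : Nat)) 1
        = r :: PySem.List.pyRange (r + 1) (r + (k + 1 : Nat)) 1 := by
      apply PySem.List.pyRange_one_cons; push_cast; omega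
    have hshift : r + ((k + 1 : Nat) : Int) = (r + 1) + (k : Nat) := by push_cast; ring
    rw [hcons, List.flatMap_cons, hshift, ih (r + 1) (by omega)]
    have hsplit : PySem.List.pyRange (pvStart base rem r) (pvStart base rem ((r + 1) + (k : Nat))) 1
        = PySem.List.pyRange (pvStart base rem r) (pvStart base rem (r + 1)) 1
          ++ PySem.List.pyRange (pvStart base rem (r + 1)) (pvStart base rem ((r + 1) + (k : Nat))) 1 := by
      rw [PySem.List.pyRange_one_append]
      · exact pvStart_mono base rem r (r + 1) hbase (by omega)
      · exact pvStart_mono base rem (r + 1) ((r + 1) + (k : Nat)) hbase (by omega)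
    rw [hsplit, List.map_append]
    congr 1
    apply List.map_congr_left
    intro i hi
    rw [PySem.List.mem_pyRange_one] at hi
    rw [pvRank_eq base rem r i hbase hrem hr hi.1 hi.2]

-- A's outer fold, started at the right start offset, is the fold of pvStep over the flattened pair list
lemma pvLoopA (pcs : List Int) (base rem : Int) (_hbase : 0 ≤ base) (hrem : 0 ≤ rem) :
    ∀ (k : Nat) (r : Int), 0 ≤ r → ∀ (asn : List (List Int)) (loads : List Int),
    (PySem.List.pyRange r (r + k) 1).foldl (pvBodyA pcs base rem) (asn, loads, pvStart base rem r)
      = (((PySem.List.pyRange r (r + k) 1).flatMap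
            (fun q => (PySem.List.pyRange (pvStart base rem q) (pvStart base rem (q + 1)) 1).map (fun i => (q, i)))).foldl
            (pvStep pcs) (asn, loads) |>.1,
         ((PySem.List.pyRange r (r + k) 1).flatMap
            (fun q => (PySem.List.pyRange (pvStart base rem q) (pvStart base rem (q + 1)) 1).map (fun i => (q, i)))).foldl
            (pvStep pcs) (asn, loads) |>.2,
         pvStart base rem (r + k)) := by
  intro k
  induction k with
  | zero =>
    intro r hr asn loads
    simp [PySem.List.pyRange_one_eq_nil]
  | succ k ih =>
    intro r hr asn loads
    have hcons : PySem.List.pyRange r (r + (k + 1 : Nat)) 1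
        = r :: PySem.List.pyRange (r + 1) (r + (k + 1 : Nat)) 1 := by
      apply PySem.List.pyRange_one_cons; push_cast; omega
    have hshift : r + ((k + 1 : Nat) : Int) = (r + 1) + (k : Nat) := by push_cast; ring
    rw [hcons, List.foldl_cons, List.flatMap_cons, List.foldl_append, hshift]
    have hbody : pvBodyA pcs base rem (asn, loads, pvStart base rem r) r
        = (((PySem.List.pyRange (pvStart base rem r) (pvStart base rem (r + 1)) 1).map (fun i => (r, i))).foldl
              (pvStep pcs) (asn, loads) |>.1,
           ((PySem.List.pyRange (pvStart base rem r) (pvStart base rem (r + 1)) 1).map (fun i => (r, i))).foldl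
              (pvStep pcs) (asn, loads) |>.2,
           pvStart base rem (r + 1)) := by
      unfold pvBodyA
      rw [List.foldl_map]
      have he : pvStart base rem r + (base + (if r < rem then (1 : Int) else 0)) = pvStart base rem (r + 1) :=
        (pvStart_succ base rem r hr hrem).symm
      simp only [he]
      rfl
    rw [hbody, ih (r + 1) (by omega), Prod.mk.eta]

-- enumerate-based fold of pvBodyB = fold of pvStep over the image-major pair list
lemma pvLoopB (pcs : List Int) (base rem : Int) (st : List (List Int) × List Int) :
    (PySem.List.enumerate pcs 0).foldl (pvBodyB base rem (rem * (base + 1))) st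
      = ((PySem.List.pyRange 0 (PySem.List.len pcs) 1).map
            (fun i => (pvRank base rem (rem * (base + 1)) i, i))).foldl (pvStep pcs) st := by
  rw [PySem.List.enumerate_eq_map_pyRange pcs 0, List.foldl_map, List.foldl_map]
  rfl

lemma pvStart_zero (base rem : Int) (hrem : 0 ≤ rem) : pvStart base rem 0 = 0 := by
  unfold pvStart; omega

-- ===== VERDICT (by name: the statement is the Claim_ definition above) =====
theorem assign_images_to_dp_ranks_spec : Claim_equal_assign_images_to_dp_ranks := by
  intro pcs d _hDom hPre
  unfold Spec_assign_images_to_dp_ranks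
  by_cases hnil : pcs = []
  · subst hnil
    simp [assign_images_to_dp_ranks, assign_images_to_dp_ranks_alt, PySem.List.len]
  · have hd : 1 ≤ d := by
      rcases hPre with h | h
      · exact h
      · exact absurd h hnil
    have hn : (0 : Int) < PySem.List.len pcs := by
      simp only [PySem.List.len_eq]
      have : pcs.length ≠ 0 := fun h => hnil (List.eq_nil_of_length_eq_zero h)
      omega
    set n : Int := PySem.List.len pcs with hn_def
    set base : Int := PySem.Int.floordiv n d with hbase_def
    set rem : Int := PySem.Int.mod n d with hrem_def
    have hbase : 0 ≤ base := by
      rw [hbase_def, PySem.Int.floordiv_eq_ediv_of_pos (by omega)]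
      exact Int.ediv_nonneg (by omega) (by omega)
    have hrem : 0 ≤ rem := PySem.Int.mod_nonneg n (by omega)
    have hremlt : rem < d := PySem.Int.mod_lt n (by omega)
    have hsum : base * d + rem = n := PySem.Int.floordiv_mul_add_mod n d
    have hstartd : pvStart base rem d = n := by
      unfold pvStart
      have : min d rem = rem := by omega
      rw [this]; linarith [hsum, mul_comm d base]
    have hne : ¬ (n = 0) := by omega
    have hA := pvLoopA pcs base rem hbase hrem d.toNat 0 le_rfl
      ((PySem.List.pyRange 0 d 1).map (fun _ => ([] : List Int)))
      ((PySem.List.pyRange 0 d 1).map (fun _ => (0 : Int)))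
    have hFlat := pvFlat base rem hbase hrem d.toNat 0 le_rfl
    rw [pvStart_zero base rem hrem, show (0 : Int) + (d.toNat : Int) = d from by omega, hstartd] at hA hFlat
    rw [hFlat] at hA
    have hB := pvLoopB pcs base rem
      ((PySem.List.pyRange 0 d 1).map (fun _ => ([] : List Int)),
       (PySem.List.pyRange 0 d 1).map (fun _ => (0 : Int)))
    simp only [assign_images_to_dp_ranks, assign_images_to_dp_ranks_alt]
    rw [if_neg hne, if_neg hne, hA, hB]
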